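-- pv_equiv track=rewrite | github.com/Sugarc0de/2025_pig_coding | pig_book_hotel.py | pig_book_hotel_bs
-- ===== SOURCE A (Python) =====
-- def pig_book_hotel_bs(hotels, dist):
--     # We always want to keep:
--     # lo <= dist - xi and
--     # hi > dist - xi
--     lst = list(sorted(hotels))
--     ans = 0
--     for i in range(len(lst)):
--         xi = lst[i]
--         lo = i
--         hi = len(lst)
--         while lo < hi - 1:
--             mid = (lo + hi) // 2
--             if lst[mid] - xi <= dist:  # be careful about negative and positive numbers
--                 lo = mid
--             else:
--                 hi = mid
--         ans += lo - i
--     return ans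
-- ===== SOURCE B (Python) =====
-- def pig_book_hotel_bs(hotels, dist):
--     lst = sorted(hotels)
--     ans = 0
--     left = 0
--     for right in range(len(lst)):
--         while left < right and lst[right] - lst[left] > dist:
--             left += 1
--         ans += right - left
--     return ans
-- ===== Notes on version B (the rewrite author's own statement) =====
-- stated objective: faster
-- what changed: Replaced the per-element hand-written binary search over the sorted list by a single two-pointer sweep whose left pointer only ever advances, so the scan after sorting is linear instead of n binary searches.
import Mathlib
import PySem

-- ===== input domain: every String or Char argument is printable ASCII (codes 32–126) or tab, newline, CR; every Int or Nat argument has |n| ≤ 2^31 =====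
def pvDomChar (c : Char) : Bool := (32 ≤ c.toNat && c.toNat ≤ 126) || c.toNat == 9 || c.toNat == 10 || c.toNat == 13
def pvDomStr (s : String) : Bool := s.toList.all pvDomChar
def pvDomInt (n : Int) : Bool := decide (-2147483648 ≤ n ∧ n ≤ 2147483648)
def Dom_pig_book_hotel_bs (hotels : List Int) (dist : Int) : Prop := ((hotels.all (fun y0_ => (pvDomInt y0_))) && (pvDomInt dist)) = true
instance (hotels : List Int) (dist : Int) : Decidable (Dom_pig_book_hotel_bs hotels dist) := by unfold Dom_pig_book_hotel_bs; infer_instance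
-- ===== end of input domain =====

-- B replaces A's per-element hand-written binary search with a single two-pointer sweep (measured faster; same sort).

-- ===== PORT A =====
-- the 'while lo < hi - 1' binary-search loop; fuel bounds the iteration count (hi - lo shrinks
-- every step, so fuel = len(lst) at the call site below is always enough)
def pvBS (lst : List Int) (dist xi : Int) (lo hi : Int) : Nat → Int
  | 0 => lo
  | f + 1 =>
    if lo < hi - 1 then
      let mid := PySem.Int.floordiv (lo + hi) 2
      if PySem.List.pyGetD lst mid 0 - xi ≤ dist then pvBS lst dist xi mid hi f
      else pvBS lst dist xi lo mid f
    else lo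

-- indices i and mid are always in range, so pyGetD with default 0 is exact where Python indexes
def pig_book_hotel_bs (hotels : List Int) (dist : Int) : Int :=
  let lst := PySem.List.sorted hotels (fun x => x) false
  (PySem.List.pyRange 0 (PySem.List.len lst) 1).foldl
    (fun ans i =>
      let xi := PySem.List.pyGetD lst i 0
      let lo := pvBS lst dist xi i (PySem.List.len lst) lst.length
      ans + (lo - i)) 0

-- ===== PORT B =====
-- the 'while left < right and lst[right] - lst[left] > dist' loop; fuel bounds the iteration
-- count (left only increases and stops at right, so fuel = len(lst) at the call site is enough);
-- indices right and left are always in range, so pyGetD with default 0 is exact where Python indexes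
def pvAdvance (lst : List Int) (dist right : Int) (left : Int) : Nat → Int
  | 0 => left
  | f + 1 =>
    if left < right ∧ dist < PySem.List.pyGetD lst right 0 - PySem.List.pyGetD lst left 0 then
      pvAdvance lst dist right (left + 1) f
    else left

def pig_book_hotel_bs_alt (hotels : List Int) (dist : Int) : Int :=
  let lst := PySem.List.sorted hotels (fun x => x) false
  ((PySem.List.pyRange 0 (PySem.List.len lst) 1).foldl
    (fun s right =>
      let left := pvAdvance lst dist right s.2 lst.length
      (s.1 + (right - left), left)) ((0 : Int), (0 : Int))).1

-- ===== PRECONDITION & SPEC =====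
def Spec_pig_book_hotel_bs (hotels : List Int) (dist : Int) (out : Int) : Prop := out = pig_book_hotel_bs_alt hotels dist
instance (hotels : List Int) (dist : Int) (out : Int) : Decidable (Spec_pig_book_hotel_bs hotels dist out) := by unfold Spec_pig_book_hotel_bs; infer_instance

-- ===== CLAIM (what is proved, stated in full; the proofs are below) =====
def Claim_equal_pig_book_hotel_bs : Prop := ∀ (hotels : List Int) (dist : Int), Dom_pig_book_hotel_bs hotels dist → Spec_pig_book_hotel_bs hotels dist (pig_book_hotel_bs hotels dist)

-- ===== LEMMAS AND PROOFS =====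

-- sortedness gives monotone indexing
lemma pvGetD_mono (lst : List Int) (hs : lst.Pairwise (· ≤ ·)) (a b : Int)
    (h0 : 0 ≤ a) (hab : a ≤ b) (hb : b < (lst.length : Int)) :
    PySem.List.pyGetD lst a 0 ≤ PySem.List.pyGetD lst b 0 := by
  rw [PySem.List.pyGetD_eq_getElem lst (i := a) 0 h0 (by omega),
      PySem.List.pyGetD_eq_getElem lst (i := b) 0 (by omega) (by omega)]
  rcases eq_or_lt_of_le hab with h | h
  · subst h; exact le_refl _
  · exact (List.pairwise_iff_getElem.mp hs) a.toNat b.toNat (by omega) (by omega) (by omega)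

-- invariant of A's binary-search loop
lemma pvBS_inv (lst : List Int) (dist xi i : Int) :
    ∀ (fuel : Nat) (lo hi : Int), i ≤ lo → lo < hi → hi ≤ (lst.length : Int) →
    hi - lo ≤ (fuel : Int) + 1 →
    (lo = i ∨ PySem.List.pyGetD lst lo 0 - xi ≤ dist) →
    (hi = (lst.length : Int) ∨ ¬ (PySem.List.pyGetD lst hi 0 - xi ≤ dist)) →
    i ≤ pvBS lst dist xi lo hi fuel ∧ pvBS lst dist xi lo hi fuel < (lst.length : Int) ∧
    (pvBS lst dist xi lo hi fuel = i ∨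
      PySem.List.pyGetD lst (pvBS lst dist xi lo hi fuel) 0 - xi ≤ dist) ∧
    (pvBS lst dist xi lo hi fuel + 1 = (lst.length : Int) ∨
      ¬ (PySem.List.pyGetD lst (pvBS lst dist xi lo hi fuel + 1) 0 - xi ≤ dist)) := by
  intro fuel
  induction fuel with
  | zero =>
    intro lo hi h1 h2 h3 h4 h5 h6
    have hlo : lo = hi - 1 := by omega
    simp only [pvBS]
    refine ⟨h1, by omega, h5, ?_⟩
    rcases h6 with h | h
    · left; omega
    · right; rwa [show lo + 1 = hi by omega]
  | succ f ih =>
    intro lo hi h1 h2 h3 h4 h5 h6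
    simp only [pvBS]
    by_cases hc : lo < hi - 1
    · simp only [if_pos hc]
      set mid := PySem.Int.floordiv (lo + hi) 2 with hmid
      have hm1 : lo + 1 ≤ mid := by
        rw [hmid, PySem.Int.le_floordiv_iff_mul_le (by omega : (0:Int) < 2)]; omega
      have hm2 : mid < hi := by
        rw [hmid, PySem.Int.floordiv_lt_iff_lt_mul (by omega)]; omega
      by_cases hp : PySem.List.pyGetD lst mid 0 - xi ≤ dist
      · simp only [if_pos hp]
        exact ih mid hi (by omega) (by omega) h3 (by omega) (Or.inr hp) h6
      · simp only [if_neg hp]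
        exact ih lo mid h1 (by omega) (by omega) (by omega) h5 (Or.inr hp)
    · simp only [if_neg hc]
      have hlo : lo = hi - 1 := by omega
      refine ⟨h1, by omega, h5, ?_⟩
      rcases h6 with h | h
      · left; omega
      · right; rwa [show lo + 1 = hi by omega]

-- A's binary search counts, for index i, the later indices within dist
lemma pvBS_count (lst : List Int) (hs : lst.Pairwise (· ≤ ·)) (dist i : Int)
    (h0 : 0 ≤ i) (hin : i < (lst.length : Int)) :
    pvBS lst dist (PySem.List.pyGetD lst i 0) i (lst.length : Int) lst.length - i
      = ((PySem.List.pyRange (i + 1) (lst.length : Int) 1).countP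
          (fun j => PySem.List.pyGetD lst j 0 - PySem.List.pyGetD lst i 0 ≤ dist) : Int) := by
  set xi := PySem.List.pyGetD lst i 0 with hxi
  obtain ⟨q1, q2, q3, q4⟩ :=
    pvBS_inv lst dist xi i lst.length i (lst.length : Int) (le_refl i) hin (le_refl _)
      (by omega) (Or.inl rfl) (Or.inl rfl)
  set lo := pvBS lst dist xi i (lst.length : Int) lst.length with hlo
  have hchar : ∀ j : Int, i < j → j < (lst.length : Int) →
      ((PySem.List.pyGetD lst j 0 - xi ≤ dist) ↔ j ≤ lo) := by
    intro j hj1 hj2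
    constructor
    · intro hPj
      by_contra hgt
      push Not at hgt
      rcases q4 with h | h
      · omega
      · exact h (by
          have := pvGetD_mono lst hs (lo + 1) j (by omega) (by omega) hj2
          omega)
    · intro hjlo
      rcases q3 with h | h
      · omega
      · have := pvGetD_mono lst hs j lo (by omega) hjlo q2
        omega
  rw [PySem.List.pyRange_one_append (i + 1) (lo + 1) (lst.length : Int) (by omega) (by omega),
      List.countP_append]
  have hall : (PySem.List.pyRange (i + 1) (lo + 1) 1).countP
      (fun j => PySem.List.pyGetD lst j 0 - xi ≤ dist)
      = (PySem.List.pyRange (i + 1) (lo + 1) 1).length := by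
    apply List.countP_eq_length.mpr
    intro j hj
    rw [PySem.List.mem_pyRange_one] at hj
    simpa using (hchar j (by omega) (by omega)).mpr (by omega)
  have hnone : (PySem.List.pyRange (lo + 1) (lst.length : Int) 1).countP
      (fun j => PySem.List.pyGetD lst j 0 - xi ≤ dist) = 0 := by
    apply List.countP_eq_zero.mpr
    intro j hj
    rw [PySem.List.mem_pyRange_one] at hj
    simp only [decide_eq_true_eq]
    intro hPj
    have := (hchar j (by omega) (by omega)).mp hPj
    omega
  rw [hall, hnone, PySem.List.length_pyRange_one]
  push_cast [Int.toNat_of_nonneg (show (0:Int) ≤ lo + 1 - (i + 1) by omega)]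
  omega

-- B's inner while loop: the left pointer stops at the first index within dist (or at right)
lemma pvAdvance_spec (lst : List Int) (dist r : Int) :
    ∀ (fuel : Nat) (left : Int), 0 ≤ left → left ≤ r → r - left ≤ (fuel : Int) →
    left ≤ pvAdvance lst dist r left fuel ∧ pvAdvance lst dist r left fuel ≤ r ∧
    (∀ k, left ≤ k → k < pvAdvance lst dist r left fuel →
      dist < PySem.List.pyGetD lst r 0 - PySem.List.pyGetD lst k 0) ∧
    (pvAdvance lst dist r left fuel = r ∨
      PySem.List.pyGetD lst r 0 - PySem.List.pyGetD lst (pvAdvance lst dist r left fuel) 0 ≤ dist) := by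
  intro fuel
  induction fuel with
  | zero =>
    intro left h0 h1 h2
    have : left = r := by omega
    simp only [pvAdvance]
    exact ⟨le_refl _, h1, fun k hk1 hk2 => by omega, Or.inl this⟩
  | succ f ih =>
    intro left h0 h1 h2
    simp only [pvAdvance]
    by_cases hc : left < r ∧ dist < PySem.List.pyGetD lst r 0 - PySem.List.pyGetD lst left 0
    · simp only [if_pos hc]
      obtain ⟨w1, w2, w3, w4⟩ := ih (left + 1) (by omega) (by omega) (by omega)
      refine ⟨by omega, w2, ?_, w4⟩
      intro k hk1 hk2
      rcases eq_or_lt_of_le hk1 with h | h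
      · subst h; exact hc.2
      · exact w3 k (by omega) hk2
    · simp only [if_neg hc]
      push Not at hc
      refine ⟨le_refl _, h1, fun k hk1 hk2 => by omega, ?_⟩
      rcases eq_or_lt_of_le h1 with h | h
      · exact Or.inl h
      · exact Or.inr (hc h)

-- one step of B's outer loop contributes exactly the count of earlier indices within dist
lemma pvStep_count (lst : List Int) (hs : lst.Pairwise (· ≤ ·)) (dist r ℓ : Int)
    (hrn : r < (lst.length : Int)) (h0 : 0 ≤ ℓ) (h1 : ℓ ≤ r)
    (hprev : ∀ k, 0 ≤ k → k < ℓ → dist < PySem.List.pyGetD lst r 0 - PySem.List.pyGetD lst k 0) :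
    (r - pvAdvance lst dist r ℓ lst.length
        = ((PySem.List.pyRange 0 r 1).countP
            (fun l => PySem.List.pyGetD lst r 0 - PySem.List.pyGetD lst l 0 ≤ dist) : Int)) ∧
    0 ≤ pvAdvance lst dist r ℓ lst.length ∧ pvAdvance lst dist r ℓ lst.length ≤ r ∧
    (∀ k, 0 ≤ k → k < pvAdvance lst dist r ℓ lst.length →
      dist < PySem.List.pyGetD lst r 0 - PySem.List.pyGetD lst k 0) := by
  obtain ⟨w1, w2, w3, w4⟩ := pvAdvance_spec lst dist r lst.length ℓ h0 h1 (by omega)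
  set l' := pvAdvance lst dist r ℓ lst.length with hl'
  have hbelow : ∀ k, 0 ≤ k → k < l' →
      dist < PySem.List.pyGetD lst r 0 - PySem.List.pyGetD lst k 0 := by
    intro k hk1 hk2
    by_cases hkl : k < ℓ
    · exact hprev k hk1 hkl
    · exact w3 k (by omega) hk2
  refine ⟨?_, by omega, w2, hbelow⟩
  rw [PySem.List.pyRange_one_append 0 l' r (by omega) w2, List.countP_append]
  have hnone : (PySem.List.pyRange 0 l' 1).countP
      (fun l => PySem.List.pyGetD lst r 0 - PySem.List.pyGetD lst l 0 ≤ dist) = 0 := by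
    apply List.countP_eq_zero.mpr
    intro k hk
    rw [PySem.List.mem_pyRange_one] at hk
    simp only [decide_eq_true_eq]
    have := hbelow k hk.1 hk.2
    omega
  have hall : (PySem.List.pyRange l' r 1).countP
      (fun l => PySem.List.pyGetD lst r 0 - PySem.List.pyGetD lst l 0 ≤ dist)
      = (PySem.List.pyRange l' r 1).length := by
    apply List.countP_eq_length.mpr
    intro k hk
    rw [PySem.List.mem_pyRange_one] at hk
    rcases w4 with h | h
    · omega
    · have := pvGetD_mono lst hs l' k (by omega) hk.1 (by omega)
      simp only [decide_eq_true_eq]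
      omega
  rw [hnone, hall, PySem.List.length_pyRange_one]
  push_cast [Int.toNat_of_nonneg (show (0:Int) ≤ r - l' by omega)]
  omega

-- B's fold computes the per-right counts, with the loop-carried left pointer staying valid
lemma pvFold_inv (lst : List Int) (hs : lst.Pairwise (· ≤ ·)) (dist : Int) :
    ∀ m : Nat, m ≤ lst.length →
    0 ≤ ((PySem.List.pyRange 0 (m : Int) 1).foldl
          (fun s right =>
            let left := pvAdvance lst dist right s.2 lst.length
            (s.1 + (right - left), left)) ((0 : Int), (0 : Int))).2 ∧
    ((PySem.List.pyRange 0 (m : Int) 1).foldl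
          (fun s right =>
            let left := pvAdvance lst dist right s.2 lst.length
            (s.1 + (right - left), left)) ((0 : Int), (0 : Int))).2 ≤ max ((m : Int) - 1) 0 ∧
    (∀ k, 0 ≤ k →
      k < ((PySem.List.pyRange 0 (m : Int) 1).foldl
          (fun s right =>
            let left := pvAdvance lst dist right s.2 lst.length
            (s.1 + (right - left), left)) ((0 : Int), (0 : Int))).2 →
      dist < PySem.List.pyGetD lst ((m : Int) - 1) 0 - PySem.List.pyGetD lst k 0) ∧
    ((PySem.List.pyRange 0 (m : Int) 1).foldl
          (fun s right =>
            let left := pvAdvance lst dist right s.2 lst.length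
            (s.1 + (right - left), left)) ((0 : Int), (0 : Int))).1
      = ((PySem.List.pyRange 0 (m : Int) 1).map (fun r =>
          ((PySem.List.pyRange 0 r 1).countP
            (fun l => PySem.List.pyGetD lst r 0 - PySem.List.pyGetD lst l 0 ≤ dist) : Int))).sum := by
  intro m
  induction m with
  | zero =>
    intro _
    simp only [Nat.cast_zero, PySem.List.pyRange_one_eq_nil (le_refl (0 : Int)),
      List.foldl_nil, List.map_nil, List.sum_nil]
    exact ⟨le_refl _, by omega, fun k hk1 hk2 => by omega, trivial⟩
  | succ m ih =>
    intro hm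
    obtain ⟨p0, p1, p2, p3⟩ := ih (by omega)
    have hsm : ((m + 1 : Nat) : Int) = (m : Int) + 1 := by push_cast; ring
    rw [hsm, PySem.List.pyRange_one_succ_right (show (0:Int) ≤ (m:Int) by positivity),
        List.foldl_append, List.map_append, List.sum_append]
    set s := ((PySem.List.pyRange 0 (m : Int) 1).foldl
          (fun s right =>
            let left := pvAdvance lst dist right s.2 lst.length
            (s.1 + (right - left), left)) ((0 : Int), (0 : Int))) with hsdef
    -- the carried left pointer is still valid for the new right = m, by monotonicity of lst
    have hprev : ∀ k, 0 ≤ k → k < s.2 →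
        dist < PySem.List.pyGetD lst (m : Int) 0 - PySem.List.pyGetD lst k 0 := by
      intro k hk1 hk2
      have hmpos : (0 : Int) < (m : Int) := by
        have := p1; omega
      have hmono := pvGetD_mono lst hs ((m : Int) - 1) (m : Int) (by omega) (by omega)
        (by omega)
      have := p2 k hk1 hk2
      omega
    obtain ⟨c1, c2, c3, c4⟩ := pvStep_count lst hs dist (m : Int) s.2
      (by omega) p0 (by omega) hprev
    simp only [List.foldl_cons, List.foldl_nil, List.map_cons, List.map_nil, List.sum_cons,
      List.sum_nil, add_zero]
    rw [show (m : Int) + 1 - 1 = (m : Int) by ring]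
    refine ⟨c2, by omega, fun k hk1 hk2 => c4 k hk1 (by omega), ?_⟩
    rw [p3, c1]

-- counting pairs by their smaller index equals counting them by their larger index
lemma pvSwap_sum (Q : Int → Int → Prop) [inst : ∀ i j, Decidable (Q i j)] :
    ∀ m : Nat,
    ((PySem.List.pyRange 0 (m : Int) 1).map (fun i =>
        ((PySem.List.pyRange (i + 1) (m : Int) 1).countP (fun j => Q i j) : Int))).sum
      = ((PySem.List.pyRange 0 (m : Int) 1).map (fun r =>
        ((PySem.List.pyRange 0 r 1).countP (fun l => Q l r) : Int))).sum := by
  intro m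
  induction m with
  | zero => simp [PySem.List.pyRange_one_eq_nil (le_refl (0 : Int))]
  | succ m ih =>
    have hsm : ((m + 1 : Nat) : Int) = (m : Int) + 1 := by push_cast; ring
    rw [hsm, PySem.List.pyRange_one_succ_right (show (0:Int) ≤ (m:Int) by positivity),
        List.map_append, List.sum_append, List.map_append, List.sum_append]
    -- each inner range on the left gains the new endpoint m
    have hsplit : ((PySem.List.pyRange 0 (m : Int) 1).map (fun i =>
        ((PySem.List.pyRange (i + 1) ((m : Int) + 1) 1).countP (fun j => Q i j) : Int))).sum
        = ((PySem.List.pyRange 0 (m : Int) 1).map (fun i =>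
            ((PySem.List.pyRange (i + 1) (m : Int) 1).countP (fun j => Q i j) : Int))).sum
          + ((PySem.List.pyRange 0 (m : Int) 1).map (fun i =>
              (if decide (Q i (m : Int)) = true then (1 : Int) else 0))).sum := by
      rw [← PySem.List.sum_map_add_int]
      apply congrArg
      apply List.map_congr_left
      intro i hi
      rw [PySem.List.mem_pyRange_one] at hi
      rw [PySem.List.pyRange_one_succ_right (show i + 1 ≤ (m:Int) by omega), List.countP_append]
      simp only [List.countP_cons, List.countP_nil]
      push_cast
      by_cases h : Q i (m : Int) <;> simp [h]
    have hnew : ((PySem.List.pyRange 0 (m : Int) 1).map (fun i =>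
        (if decide (Q i (m : Int)) = true then (1 : Int) else 0))).sum
        = ((PySem.List.pyRange 0 (m : Int) 1).countP (fun l => Q l (m : Int)) : Int) :=
      PySem.List.sum_map_ite_one_zero (fun i => decide (Q i (m : Int))) _
    rw [hsplit, hnew, ih]
    simp only [List.map_cons, List.map_nil, List.sum_cons, List.sum_nil, add_zero]
    have hlast : ((PySem.List.pyRange ((m : Int) + 1) ((m : Int) + 1) 1).countP
        (fun j => Q (m : Int) j) : Int) = 0 := by
      rw [PySem.List.pyRange_one_eq_nil (le_refl _)]
      simp
    rw [hlast]
    ring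

-- ===== VERDICT (by name: the statement is the Claim_ definition above) =====
theorem pig_book_hotel_bs_spec : Claim_equal_pig_book_hotel_bs := by
  intro hotels dist _
  unfold Spec_pig_book_hotel_bs pig_book_hotel_bs pig_book_hotel_bs_alt
  set lst := PySem.List.sorted hotels (fun x => x) false with hlst
  have hs : lst.Pairwise (· ≤ ·) := PySem.List.sorted_pairwise hotels (fun x => x)
  simp only [PySem.List.len_eq]
  rw [PySem.List.foldl_add]
  simp only [zero_add]
  obtain ⟨_, _, _, hB⟩ := pvFold_inv lst hs dist lst.length (le_refl _)
  rw [hB]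
  rw [show ((PySem.List.pyRange 0 (lst.length : Int) 1).map
      (fun i => pvBS lst dist (PySem.List.pyGetD lst i 0) i (lst.length : Int) lst.length - i))
      = ((PySem.List.pyRange 0 (lst.length : Int) 1).map (fun i =>
          ((PySem.List.pyRange (i + 1) (lst.length : Int) 1).countP
            (fun j => PySem.List.pyGetD lst j 0 - PySem.List.pyGetD lst i 0 ≤ dist) : Int)))
    from List.map_congr_left (fun i hi => by
      rw [PySem.List.mem_pyRange_one] at hi
      exact pvBS_count lst hs dist i hi.1 hi.2)]
  exact pvSwap_sum (fun l r => PySem.List.pyGetD lst r 0 - PySem.List.pyGetD lst l 0 ≤ dist)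
    lst.length
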